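-- pv_equiv track=rewrite | github.com/Andre9642/HUC-braille-converter | python/huc.py | convertHUC6
-- ===== SOURCE A (Python) =====
-- def convertHUC6(dots, debug=False):
-- 	ref1 = "1237"
-- 	ref2 = "4568"
-- 	data = dots.split('-')
-- 	offset = 0
-- 	linedCells1 = []
-- 	linedCells2 = []
-- 	for cell in data:
-- 		for dot in "12345678":
-- 			if dot not in cell:
-- 				if dot in ref1: linedCells1.append("0")
-- 				if dot in ref2: linedCells2.append("0")
-- 			else:
-- 				dotTemp = "0"
-- 				if dot in ref1:
-- 					dotIndexTemp = (ref1.index(dot) + offset) % 3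
-- 					dotTemp = ref1[dotIndexTemp]
-- 					linedCells1.append(dotTemp)
-- 				elif dot in ref2:
-- 					dotIndexTemp = (ref2.index(dot) + offset) % 3
-- 					dotTemp = ref2[dotIndexTemp]
-- 					linedCells2.append(dotTemp)
-- 		offset = (offset + 1) % 3
-- 	result = ""
-- 	i = 0
-- 	for l1, l2 in zip(linedCells1, linedCells2):
-- 		if i % 3 == 0 and i != 0: result += "-"
-- 		cellTemp = (l1 if l1 != '0' else '') + (l2 if l2 != '0' else '')
-- 		result += cellTemp
-- 		i += 1
-- 	while "--" in result: result = result.replace("--", "-0-")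
-- 	if result.startswith('-'): result = '0'+result
-- 	if result.endswith('-'): result += '0'
-- 	return result
-- ===== SOURCE B (Python) =====
-- def convertHUC6(dots, debug=False):
-- 	ref1 = "1237"
-- 	ref2 = "4568"
-- 	pairs = []
-- 	for cellIndex, cell in enumerate(dots.split('-')):
-- 		off = cellIndex % 3
-- 		for j in range(4):
-- 			p1 = ref1[(j + off) % 3] if ref1[j] in cell else ''
-- 			p2 = ref2[(j + off) % 3] if ref2[j] in cell else ''
-- 			pairs.append(p1 + p2)
-- 	groups = [''.join(pairs[i:i+3]) for i in range(0, len(pairs), 3)]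
-- 	return '-'.join(g if g else '0' for g in groups)
-- ===== Notes on version B (the rewrite author's own statement) =====
-- stated objective: simpler
-- what changed: B builds one flat list of per-dot pair strings (empty string instead of the zero sentinel), chunks it into groups of 3 and joins the groups with dashes, substituting the zero marker for empty groups, which removes A's two parallel lists, the zip loop and the whole while-replace / startswith / endswith cleanup.
import Mathlib
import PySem

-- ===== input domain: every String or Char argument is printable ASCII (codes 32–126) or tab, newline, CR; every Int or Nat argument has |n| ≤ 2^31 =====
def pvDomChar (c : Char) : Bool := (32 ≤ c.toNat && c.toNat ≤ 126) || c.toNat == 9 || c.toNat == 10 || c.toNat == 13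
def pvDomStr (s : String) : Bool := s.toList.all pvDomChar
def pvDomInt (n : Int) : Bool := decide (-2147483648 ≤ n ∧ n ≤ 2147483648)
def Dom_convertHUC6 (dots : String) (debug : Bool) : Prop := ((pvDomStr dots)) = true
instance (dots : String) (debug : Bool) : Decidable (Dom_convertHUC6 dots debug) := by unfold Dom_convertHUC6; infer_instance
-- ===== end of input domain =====

-- B collects the per-dot pair strings into one flat list, chunks it into groups of 3 and joins the
-- groups with dashes (empty group ↦ zero marker), replacing A's zip loop and its while-replace /
-- startswith / endswith cleanup; same return value for every input.

-- ===== PORT A =====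
def hucR1 : List Char := ['1', '2', '3', '7']
def hucR2 : List Char := ['4', '5', '6', '8']
def hucDotChars : List Char := ['1', '2', '3', '4', '5', '6', '7', '8']

-- one step of A's inner `for dot in "12345678"` loop; state = (linedCells1, linedCells2).
-- ref1.index(dot) is ported as PySem.Chars.find (equal where the call is reached, i.e. dot in ref1);
-- ref1[...] is ported as pyGetD with a dummy default: the index is (...) % 3 ∈ [0,3), always in range.
def hucDotStep (cell : List Char) (offset : Int) (p : List (List Char) × List (List Char))
    (dot : Char) : List (List Char) × List (List Char) :=
  if PySem.Chars.isIn [dot] cell = false then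
    ((if PySem.Chars.isIn [dot] hucR1 then p.1 ++ [['0']] else p.1),
     (if PySem.Chars.isIn [dot] hucR2 then p.2 ++ [['0']] else p.2))
  else if PySem.Chars.isIn [dot] hucR1 then
    (p.1 ++ [[PySem.List.pyGetD hucR1 (PySem.Int.mod (PySem.Chars.find hucR1 [dot] + offset) 3) ' ']], p.2)
  else if PySem.Chars.isIn [dot] hucR2 then
    (p.1, p.2 ++ [[PySem.List.pyGetD hucR2 (PySem.Int.mod (PySem.Chars.find hucR2 [dot] + offset) 3) ' ']])
  else p

-- one step of A's outer `for cell in data` loop; state = (offset, linedCells1, linedCells2)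
def hucCellStep (st : Int × List (List Char) × List (List Char)) (cell : List Char) :
    Int × List (List Char) × List (List Char) :=
  let r := hucDotChars.foldl (hucDotStep cell st.1) (st.2.1, st.2.2)
  (PySem.Int.mod (st.1 + 1) 3, r.1, r.2)

-- one step of A's `for l1, l2 in zip(...)` loop; state = (result, i)
def hucZipStep (ri : List Char × Nat) (p : List Char × List Char) : List Char × Nat :=
  let r := if ri.2 % 3 == 0 && ri.2 != 0 then ri.1 ++ ['-'] else ri.1
  (r ++ ((if p.1 ≠ ['0'] then p.1 else []) ++ (if p.2 ≠ ['0'] then p.2 else [])), ri.2 + 1)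

-- A's `while "--" in result: result = result.replace("--", "-0-")`, with fuel; each pass strictly
-- decreases the number of empty dash-separated segments, so fuel = length+1 always reaches the fixpoint.
def hucCleanLoop : Nat → List Char → List Char
  | 0, s => s
  | fuel + 1, s =>
    if PySem.Chars.isIn ['-', '-'] s then
      hucCleanLoop fuel (PySem.Chars.replace s ['-', '-'] ['-', '0', '-'])
    else s

def convertHUC6 (dots : String) (debug : Bool) : String :=
  let data := PySem.Chars.splitOn dots.toList ['-']
  let st := data.foldl hucCellStep (0, [], [])
  let res := (st.2.1.zip st.2.2).foldl hucZipStep ([], 0)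
  let r1 := hucCleanLoop (res.1.length + 1) res.1
  let r2 := if PySem.Chars.startswith r1 ['-'] then '0' :: r1 else r1
  let r3 := if PySem.Chars.endswith r2 ['-'] then r2 ++ ['0'] else r2
  String.ofList r3

-- ===== PORT B =====
def hucAltR1 : List Char := ['1', '2', '3', '7']
def hucAltR2 : List Char := ['4', '5', '6', '8']

-- the pair string p1 + p2 for dot column j of a cell (off = cellIndex % 3)
def hucAltPair (cell : List Char) (off : Int) (j : Int) : List Char :=
  (if PySem.Chars.isIn [PySem.List.pyGetD hucAltR1 j ' '] cell then
      [PySem.List.pyGetD hucAltR1 (PySem.Int.mod (j + off) 3) ' '] else []) ++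
  (if PySem.Chars.isIn [PySem.List.pyGetD hucAltR2 j ' '] cell then
      [PySem.List.pyGetD hucAltR2 (PySem.Int.mod (j + off) 3) ' '] else [])

-- body of B's `for cellIndex, cell in enumerate(...)` loop
def hucAltCell (ps : List (List Char)) (ic : Int × List Char) : List (List Char) :=
  (PySem.List.pyRange 0 4 1).foldl
    (fun ps j => ps ++ [hucAltPair ic.2 (PySem.Int.mod ic.1 3) j]) ps

-- B's `[''.join(pairs[i:i+3]) for i in range(0, len(pairs), 3)]`
def hucChunks3 : List (List Char) → List (List Char)
  | [] => []
  | p :: t => (p ++ (t.take 2).flatten) :: hucChunks3 (t.drop 2)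
  termination_by ps => ps.length
  decreasing_by simp [List.length_drop]

def convertHUC6_alt (dots : String) (debug : Bool) : String :=
  let data := PySem.Chars.splitOn dots.toList ['-']
  let pairs := (PySem.List.enumerate data).foldl hucAltCell []
  let groups := hucChunks3 pairs
  String.ofList (PySem.Chars.join ['-'] (groups.map (fun g => if g = [] then ['0'] else g)))

-- ===== PRECONDITION & SPEC =====
def Spec_convertHUC6 (dots : String) (debug : Bool) (out : String) : Prop := out = convertHUC6_alt dots debug
instance (dots : String) (debug : Bool) (out : String) : Decidable (Spec_convertHUC6 dots debug out) := by unfold Spec_convertHUC6; infer_instance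

-- ===== CLAIM (what is proved, stated in full; the proofs are below) =====
def Claim_equal_convertHUC6 : Prop := ∀ (dots : String) (debug : Bool), Dom_convertHUC6 dots debug → Spec_convertHUC6 dots debug (convertHUC6 dots debug)

-- ===== LEMMAS AND PROOFS =====

-- spec-side vocabulary
def combineE (p : List Char × List Char) : List Char :=
  (if p.1 ≠ ['0'] then p.1 else []) ++ (if p.2 ≠ ['0'] then p.2 else [])

def cellPairs (cell : List Char) (m : Int) : List (List Char) :=
  [hucAltPair cell m 0, hucAltPair cell m 1, hucAltPair cell m 2, hucAltPair cell m 3]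

def pairsSpec : List (List Char) → Int → List (List Char)
  | [], _ => []
  | c :: t, k => cellPairs c (PySem.Int.mod k 3) ++ pairsSpec t (k + 1)

def ent1 (cell : List Char) (m : Int) (dot : Char) : List Char :=
  if PySem.Chars.isIn [dot] cell then
    [PySem.List.pyGetD hucR1 (PySem.Int.mod (PySem.Chars.find hucR1 [dot] + m) 3) ' '] else ['0']

def ent2 (cell : List Char) (m : Int) (dot : Char) : List Char :=
  if PySem.Chars.isIn [dot] cell then
    [PySem.List.pyGetD hucR2 (PySem.Int.mod (PySem.Chars.find hucR2 [dot] + m) 3) ' '] else ['0']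

def lined1 (cell : List Char) (m : Int) : List (List Char) :=
  [ent1 cell m '1', ent1 cell m '2', ent1 cell m '3', ent1 cell m '7']

def lined2 (cell : List Char) (m : Int) : List (List Char) :=
  [ent2 cell m '4', ent2 cell m '5', ent2 cell m '6', ent2 cell m '8']

def hucJoinStep (ri : List Char × Nat) (c : List Char) : List Char × Nat :=
  ((if ri.2 % 3 == 0 && ri.2 != 0 then ri.1 ++ ['-'] else ri.1) ++ c, ri.2 + 1)

def specJ : List (List Char) → List Char
  | [] => []
  | a :: t => a ++ t.flatMap (fun g => '-' :: g)

def hucRep : List Char → List Char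
  | [] => []
  | [c] => [c]
  | c :: d :: t => if c = '-' ∧ d = '-' then '-' :: '0' :: '-' :: hucRep t else c :: hucRep (d :: t)

def hucHas2 : List Char → Bool
  | [] => false
  | [_] => false
  | c :: d :: t => if c = '-' ∧ d = '-' then true else hucHas2 (d :: t)

def hucPass : List (List Char) → List (List Char)
  | [] => []
  | [a] => [a]
  | [a, b] => [a, b]
  | a :: b :: c :: rest =>
    if b = [] then a :: ['0'] :: hucPass (c :: rest) else a :: hucPass (b :: c :: rest)

def hucHasIE : List (List Char) → Bool
  | [] => false
  | [_] => false
  | [_, _] => false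
  | _ :: b :: c :: rest => if b = [] then true else hucHasIE (b :: c :: rest)

def dashFree (gs : List (List Char)) : Prop := ∀ g ∈ gs, ∀ c ∈ g, c ≠ '-'

def countEmpty (gs : List (List Char)) : Nat := gs.countP (fun g => g.isEmpty)

def fixG (g : List Char) : List Char := if g = [] then ['0'] else g

def hucPatches (s : List Char) : List Char :=
  let r2 := if PySem.Chars.startswith s ['-'] then '0' :: s else s
  if PySem.Chars.endswith r2 ['-'] then r2 ++ ['0'] else r2

lemma specJ_cons (a : List Char) (t : List (List Char)) (h : t ≠ []) :
    specJ (a :: t) = a ++ '-' :: specJ t := by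
  rcases t with _ | ⟨b, t'⟩
  · exact absurd rfl h
  · simp [specJ]

lemma join_eq_specJ (gs : List (List Char)) : PySem.Chars.join ['-'] gs = specJ gs := by
  induction gs with
  | nil => rfl
  | cons a t ih =>
    rcases t with _ | ⟨b, t'⟩
    · simp [PySem.Chars.join, List.intercalate, specJ]
    · rw [specJ_cons a _ (by simp)]
      rw [show PySem.Chars.join ['-'] (a :: b :: t') = a ++ ['-'] ++ PySem.Chars.join ['-'] (b :: t') by
        simp [PySem.Chars.join, List.intercalate]]
      rw [ih]; simp

-- ---- B's fold = pairsSpec ----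
lemma altCell_eq (ps : List (List Char)) (ic : Int × List Char) :
    hucAltCell ps ic = ps ++ cellPairs ic.2 (PySem.Int.mod ic.1 3) := by
  rw [hucAltCell, show PySem.List.pyRange 0 4 1 = [0, 1, 2, 3] from by decide]
  simp [cellPairs, List.append_assoc]

lemma altPairs_eq (data : List (List Char)) : ∀ (k : Int) (ps : List (List Char)),
    (PySem.List.enumerate data k).foldl hucAltCell ps = ps ++ pairsSpec data k := by
  induction data with
  | nil => intro k ps; simp [PySem.List.enumerate, pairsSpec]
  | cons c t ih =>
    intro k ps
    rw [show PySem.List.enumerate (c :: t) k = (k, c) :: PySem.List.enumerate t (k + 1) from by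
      simp [PySem.List.enumerate]]
    rw [List.foldl_cons, altCell_eq, ih, pairsSpec, List.append_assoc]

-- ---- A's cell loop ----
lemma dotStep1 (cell : List Char) (m : Int) (p : List (List Char) × List (List Char)) :
    hucDotStep cell m p '1' = (p.1 ++ [ent1 cell m '1'], p.2) := by
  cases hmem : PySem.Chars.isIn ['1'] cell <;>
    simp [hucDotStep, ent1, hmem,
      show PySem.Chars.isIn ['1'] hucR1 = true from by decide,
      show PySem.Chars.isIn ['1'] hucR2 = false from by decide]

lemma dotStep2 (cell : List Char) (m : Int) (p : List (List Char) × List (List Char)) :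
    hucDotStep cell m p '2' = (p.1 ++ [ent1 cell m '2'], p.2) := by
  cases hmem : PySem.Chars.isIn ['2'] cell <;>
    simp [hucDotStep, ent1, hmem,
      show PySem.Chars.isIn ['2'] hucR1 = true from by decide,
      show PySem.Chars.isIn ['2'] hucR2 = false from by decide]

lemma dotStep3 (cell : List Char) (m : Int) (p : List (List Char) × List (List Char)) :
    hucDotStep cell m p '3' = (p.1 ++ [ent1 cell m '3'], p.2) := by
  cases hmem : PySem.Chars.isIn ['3'] cell <;>
    simp [hucDotStep, ent1, hmem,
      show PySem.Chars.isIn ['3'] hucR1 = true from by decide,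
      show PySem.Chars.isIn ['3'] hucR2 = false from by decide]

lemma dotStep7 (cell : List Char) (m : Int) (p : List (List Char) × List (List Char)) :
    hucDotStep cell m p '7' = (p.1 ++ [ent1 cell m '7'], p.2) := by
  cases hmem : PySem.Chars.isIn ['7'] cell <;>
    simp [hucDotStep, ent1, hmem,
      show PySem.Chars.isIn ['7'] hucR1 = true from by decide,
      show PySem.Chars.isIn ['7'] hucR2 = false from by decide]

lemma dotStep4 (cell : List Char) (m : Int) (p : List (List Char) × List (List Char)) :
    hucDotStep cell m p '4' = (p.1, p.2 ++ [ent2 cell m '4']) := by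
  cases hmem : PySem.Chars.isIn ['4'] cell <;>
    simp [hucDotStep, ent2, hmem,
      show PySem.Chars.isIn ['4'] hucR1 = false from by decide,
      show PySem.Chars.isIn ['4'] hucR2 = true from by decide]

lemma dotStep5 (cell : List Char) (m : Int) (p : List (List Char) × List (List Char)) :
    hucDotStep cell m p '5' = (p.1, p.2 ++ [ent2 cell m '5']) := by
  cases hmem : PySem.Chars.isIn ['5'] cell <;>
    simp [hucDotStep, ent2, hmem,
      show PySem.Chars.isIn ['5'] hucR1 = false from by decide,
      show PySem.Chars.isIn ['5'] hucR2 = true from by decide]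

lemma dotStep6 (cell : List Char) (m : Int) (p : List (List Char) × List (List Char)) :
    hucDotStep cell m p '6' = (p.1, p.2 ++ [ent2 cell m '6']) := by
  cases hmem : PySem.Chars.isIn ['6'] cell <;>
    simp [hucDotStep, ent2, hmem,
      show PySem.Chars.isIn ['6'] hucR1 = false from by decide,
      show PySem.Chars.isIn ['6'] hucR2 = true from by decide]

lemma dotStep8 (cell : List Char) (m : Int) (p : List (List Char) × List (List Char)) :
    hucDotStep cell m p '8' = (p.1, p.2 ++ [ent2 cell m '8']) := by
  cases hmem : PySem.Chars.isIn ['8'] cell <;>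
    simp [hucDotStep, ent2, hmem,
      show PySem.Chars.isIn ['8'] hucR1 = false from by decide,
      show PySem.Chars.isIn ['8'] hucR2 = true from by decide]

lemma cellA (cell : List Char) (m : Int) (a1 a2 : List (List Char)) :
    hucDotChars.foldl (hucDotStep cell m) (a1, a2) = (a1 ++ lined1 cell m, a2 ++ lined2 cell m) := by
  simp only [hucDotChars, List.foldl_cons, List.foldl_nil,
    dotStep1, dotStep2, dotStep3, dotStep4, dotStep5, dotStep6, dotStep7, dotStep8,
    lined1, lined2]
  simp [List.append_assoc]

lemma combineE_split (P Q : Prop) [Decidable P] [Decidable Q] (x y : Char) (hx : x ≠ '0') (hy : y ≠ '0') :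
    combineE ((if P then [x] else ['0']), (if Q then [y] else ['0'])) =
      (if P then [x] else []) ++ (if Q then [y] else []) := by
  by_cases hP : P <;> by_cases hQ : Q <;> simp [combineE, hP, hQ, hx, hy]

lemma combine_cell (cell : List Char) (m : Int) (hm : m = 0 ∨ m = 1 ∨ m = 2) :
    ((lined1 cell m).zip (lined2 cell m)).map combineE = cellPairs cell m := by
  rcases hm with rfl | rfl | rfl <;>
    simp only [lined1, lined2, cellPairs, List.zip_cons_cons, List.zip_nil_right,
      List.map_cons, List.map_nil, List.cons.injEq, and_true]
  · refine ⟨?_, ?_, ?_, ?_⟩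
    · rw [ent1, ent2, hucAltPair,
        combineE_split _ _ _ _ (by decide) (by decide),
        show PySem.List.pyGetD hucAltR1 (0 : Int) ' ' = '1' from by decide,
        show PySem.List.pyGetD hucAltR2 (0 : Int) ' ' = '4' from by decide,
        show PySem.List.pyGetD hucR1 (PySem.Int.mod (PySem.Chars.find hucR1 ['1'] + 0) 3) ' ' = '1' from by decide,
        show PySem.List.pyGetD hucR2 (PySem.Int.mod (PySem.Chars.find hucR2 ['4'] + 0) 3) ' ' = '4' from by decide,
        show PySem.List.pyGetD hucAltR1 (PySem.Int.mod ((0 : Int) + 0) 3) ' ' = '1' from by decide,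
        show PySem.List.pyGetD hucAltR2 (PySem.Int.mod ((0 : Int) + 0) 3) ' ' = '4' from by decide]
    · rw [ent1, ent2, hucAltPair,
        combineE_split _ _ _ _ (by decide) (by decide),
        show PySem.List.pyGetD hucAltR1 (1 : Int) ' ' = '2' from by decide,
        show PySem.List.pyGetD hucAltR2 (1 : Int) ' ' = '5' from by decide,
        show PySem.List.pyGetD hucR1 (PySem.Int.mod (PySem.Chars.find hucR1 ['2'] + 0) 3) ' ' = '2' from by decide,
        show PySem.List.pyGetD hucR2 (PySem.Int.mod (PySem.Chars.find hucR2 ['5'] + 0) 3) ' ' = '5' from by decide,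
        show PySem.List.pyGetD hucAltR1 (PySem.Int.mod ((1 : Int) + 0) 3) ' ' = '2' from by decide,
        show PySem.List.pyGetD hucAltR2 (PySem.Int.mod ((1 : Int) + 0) 3) ' ' = '5' from by decide]
    · rw [ent1, ent2, hucAltPair,
        combineE_split _ _ _ _ (by decide) (by decide),
        show PySem.List.pyGetD hucAltR1 (2 : Int) ' ' = '3' from by decide,
        show PySem.List.pyGetD hucAltR2 (2 : Int) ' ' = '6' from by decide,
        show PySem.List.pyGetD hucR1 (PySem.Int.mod (PySem.Chars.find hucR1 ['3'] + 0) 3) ' ' = '3' from by decide,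
        show PySem.List.pyGetD hucR2 (PySem.Int.mod (PySem.Chars.find hucR2 ['6'] + 0) 3) ' ' = '6' from by decide,
        show PySem.List.pyGetD hucAltR1 (PySem.Int.mod ((2 : Int) + 0) 3) ' ' = '3' from by decide,
        show PySem.List.pyGetD hucAltR2 (PySem.Int.mod ((2 : Int) + 0) 3) ' ' = '6' from by decide]
    · rw [ent1, ent2, hucAltPair,
        combineE_split _ _ _ _ (by decide) (by decide),
        show PySem.List.pyGetD hucAltR1 (3 : Int) ' ' = '7' from by decide,
        show PySem.List.pyGetD hucAltR2 (3 : Int) ' ' = '8' from by decide,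
        show PySem.List.pyGetD hucR1 (PySem.Int.mod (PySem.Chars.find hucR1 ['7'] + 0) 3) ' ' = '1' from by decide,
        show PySem.List.pyGetD hucR2 (PySem.Int.mod (PySem.Chars.find hucR2 ['8'] + 0) 3) ' ' = '4' from by decide,
        show PySem.List.pyGetD hucAltR1 (PySem.Int.mod ((3 : Int) + 0) 3) ' ' = '1' from by decide,
        show PySem.List.pyGetD hucAltR2 (PySem.Int.mod ((3 : Int) + 0) 3) ' ' = '4' from by decide]
  · refine ⟨?_, ?_, ?_, ?_⟩
    · rw [ent1, ent2, hucAltPair,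
        combineE_split _ _ _ _ (by decide) (by decide),
        show PySem.List.pyGetD hucAltR1 (0 : Int) ' ' = '1' from by decide,
        show PySem.List.pyGetD hucAltR2 (0 : Int) ' ' = '4' from by decide,
        show PySem.List.pyGetD hucR1 (PySem.Int.mod (PySem.Chars.find hucR1 ['1'] + 1) 3) ' ' = '2' from by decide,
        show PySem.List.pyGetD hucR2 (PySem.Int.mod (PySem.Chars.find hucR2 ['4'] + 1) 3) ' ' = '5' from by decide,
        show PySem.List.pyGetD hucAltR1 (PySem.Int.mod ((0 : Int) + 1) 3) ' ' = '2' from by decide,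
        show PySem.List.pyGetD hucAltR2 (PySem.Int.mod ((0 : Int) + 1) 3) ' ' = '5' from by decide]
    · rw [ent1, ent2, hucAltPair,
        combineE_split _ _ _ _ (by decide) (by decide),
        show PySem.List.pyGetD hucAltR1 (1 : Int) ' ' = '2' from by decide,
        show PySem.List.pyGetD hucAltR2 (1 : Int) ' ' = '5' from by decide,
        show PySem.List.pyGetD hucR1 (PySem.Int.mod (PySem.Chars.find hucR1 ['2'] + 1) 3) ' ' = '3' from by decide,
        show PySem.List.pyGetD hucR2 (PySem.Int.mod (PySem.Chars.find hucR2 ['5'] + 1) 3) ' ' = '6' from by decide,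
        show PySem.List.pyGetD hucAltR1 (PySem.Int.mod ((1 : Int) + 1) 3) ' ' = '3' from by decide,
        show PySem.List.pyGetD hucAltR2 (PySem.Int.mod ((1 : Int) + 1) 3) ' ' = '6' from by decide]
    · rw [ent1, ent2, hucAltPair,
        combineE_split _ _ _ _ (by decide) (by decide),
        show PySem.List.pyGetD hucAltR1 (2 : Int) ' ' = '3' from by decide,
        show PySem.List.pyGetD hucAltR2 (2 : Int) ' ' = '6' from by decide,
        show PySem.List.pyGetD hucR1 (PySem.Int.mod (PySem.Chars.find hucR1 ['3'] + 1) 3) ' ' = '1' from by decide,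
        show PySem.List.pyGetD hucR2 (PySem.Int.mod (PySem.Chars.find hucR2 ['6'] + 1) 3) ' ' = '4' from by decide,
        show PySem.List.pyGetD hucAltR1 (PySem.Int.mod ((2 : Int) + 1) 3) ' ' = '1' from by decide,
        show PySem.List.pyGetD hucAltR2 (PySem.Int.mod ((2 : Int) + 1) 3) ' ' = '4' from by decide]
    · rw [ent1, ent2, hucAltPair,
        combineE_split _ _ _ _ (by decide) (by decide),
        show PySem.List.pyGetD hucAltR1 (3 : Int) ' ' = '7' from by decide,
        show PySem.List.pyGetD hucAltR2 (3 : Int) ' ' = '8' from by decide,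
        show PySem.List.pyGetD hucR1 (PySem.Int.mod (PySem.Chars.find hucR1 ['7'] + 1) 3) ' ' = '2' from by decide,
        show PySem.List.pyGetD hucR2 (PySem.Int.mod (PySem.Chars.find hucR2 ['8'] + 1) 3) ' ' = '5' from by decide,
        show PySem.List.pyGetD hucAltR1 (PySem.Int.mod ((3 : Int) + 1) 3) ' ' = '2' from by decide,
        show PySem.List.pyGetD hucAltR2 (PySem.Int.mod ((3 : Int) + 1) 3) ' ' = '5' from by decide]
  · refine ⟨?_, ?_, ?_, ?_⟩
    · rw [ent1, ent2, hucAltPair,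
        combineE_split _ _ _ _ (by decide) (by decide),
        show PySem.List.pyGetD hucAltR1 (0 : Int) ' ' = '1' from by decide,
        show PySem.List.pyGetD hucAltR2 (0 : Int) ' ' = '4' from by decide,
        show PySem.List.pyGetD hucR1 (PySem.Int.mod (PySem.Chars.find hucR1 ['1'] + 2) 3) ' ' = '3' from by decide,
        show PySem.List.pyGetD hucR2 (PySem.Int.mod (PySem.Chars.find hucR2 ['4'] + 2) 3) ' ' = '6' from by decide,
        show PySem.List.pyGetD hucAltR1 (PySem.Int.mod ((0 : Int) + 2) 3) ' ' = '3' from by decide,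
        show PySem.List.pyGetD hucAltR2 (PySem.Int.mod ((0 : Int) + 2) 3) ' ' = '6' from by decide]
    · rw [ent1, ent2, hucAltPair,
        combineE_split _ _ _ _ (by decide) (by decide),
        show PySem.List.pyGetD hucAltR1 (1 : Int) ' ' = '2' from by decide,
        show PySem.List.pyGetD hucAltR2 (1 : Int) ' ' = '5' from by decide,
        show PySem.List.pyGetD hucR1 (PySem.Int.mod (PySem.Chars.find hucR1 ['2'] + 2) 3) ' ' = '1' from by decide,
        show PySem.List.pyGetD hucR2 (PySem.Int.mod (PySem.Chars.find hucR2 ['5'] + 2) 3) ' ' = '4' from by decide,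
        show PySem.List.pyGetD hucAltR1 (PySem.Int.mod ((1 : Int) + 2) 3) ' ' = '1' from by decide,
        show PySem.List.pyGetD hucAltR2 (PySem.Int.mod ((1 : Int) + 2) 3) ' ' = '4' from by decide]
    · rw [ent1, ent2, hucAltPair,
        combineE_split _ _ _ _ (by decide) (by decide),
        show PySem.List.pyGetD hucAltR1 (2 : Int) ' ' = '3' from by decide,
        show PySem.List.pyGetD hucAltR2 (2 : Int) ' ' = '6' from by decide,
        show PySem.List.pyGetD hucR1 (PySem.Int.mod (PySem.Chars.find hucR1 ['3'] + 2) 3) ' ' = '2' from by decide,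
        show PySem.List.pyGetD hucR2 (PySem.Int.mod (PySem.Chars.find hucR2 ['6'] + 2) 3) ' ' = '5' from by decide,
        show PySem.List.pyGetD hucAltR1 (PySem.Int.mod ((2 : Int) + 2) 3) ' ' = '2' from by decide,
        show PySem.List.pyGetD hucAltR2 (PySem.Int.mod ((2 : Int) + 2) 3) ' ' = '5' from by decide]
    · rw [ent1, ent2, hucAltPair,
        combineE_split _ _ _ _ (by decide) (by decide),
        show PySem.List.pyGetD hucAltR1 (3 : Int) ' ' = '7' from by decide,
        show PySem.List.pyGetD hucAltR2 (3 : Int) ' ' = '8' from by decide,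
        show PySem.List.pyGetD hucR1 (PySem.Int.mod (PySem.Chars.find hucR1 ['7'] + 2) 3) ' ' = '3' from by decide,
        show PySem.List.pyGetD hucR2 (PySem.Int.mod (PySem.Chars.find hucR2 ['8'] + 2) 3) ' ' = '6' from by decide,
        show PySem.List.pyGetD hucAltR1 (PySem.Int.mod ((3 : Int) + 2) 3) ' ' = '3' from by decide,
        show PySem.List.pyGetD hucAltR2 (PySem.Int.mod ((3 : Int) + 2) 3) ' ' = '6' from by decide]

lemma foldA_eq (data : List (List Char)) : ∀ (k : Int) (a1 a2 : List (List Char)),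
    a1.length = a2.length →
    (data.foldl hucCellStep (PySem.Int.mod k 3, a1, a2)).2.1.length =
      (data.foldl hucCellStep (PySem.Int.mod k 3, a1, a2)).2.2.length ∧
    ((data.foldl hucCellStep (PySem.Int.mod k 3, a1, a2)).2.1.zip
        (data.foldl hucCellStep (PySem.Int.mod k 3, a1, a2)).2.2).map combineE =
      (a1.zip a2).map combineE ++ pairsSpec data k := by
  induction data with
  | nil => intro k a1 a2 h; simp [pairsSpec, h]
  | cons c t ih =>
    intro k a1 a2 h
    have hm3 : PySem.Int.mod k 3 = 0 ∨ PySem.Int.mod k 3 = 1 ∨ PySem.Int.mod k 3 = 2 := by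
      have h1 := PySem.Int.mod_nonneg k (b := 3) (by norm_num)
      have h2 := PySem.Int.mod_lt k (b := 3) (by norm_num)
      omega
    have hstep : hucCellStep (PySem.Int.mod k 3, a1, a2) c =
        (PySem.Int.mod (k + 1) 3, a1 ++ lined1 c (PySem.Int.mod k 3),
          a2 ++ lined2 c (PySem.Int.mod k 3)) := by
      rw [hucCellStep]
      simp only [cellA]
      have hmm : PySem.Int.mod (PySem.Int.mod k 3 + 1) 3 = PySem.Int.mod (k + 1) 3 := by
        rw [PySem.Int.mod_eq_emod_of_pos (by norm_num : (0 : Int) < 3),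
            PySem.Int.mod_eq_emod_of_pos (by norm_num : (0 : Int) < 3),
            PySem.Int.mod_eq_emod_of_pos (by norm_num : (0 : Int) < 3)]
        omega
      rw [hmm]
    have ih' := ih (k + 1) (a1 ++ lined1 c (PySem.Int.mod k 3))
      (a2 ++ lined2 c (PySem.Int.mod k 3)) (by simp [lined1, lined2, h])
    rw [List.foldl_cons, hstep]
    refine ⟨ih'.1, ?_⟩
    rw [ih'.2, List.zip_append h, List.map_append, combine_cell c _ hm3]
    rw [pairsSpec, List.append_assoc]

-- ---- A's zip loop = join of chunks ----
lemma zipStep_eq (ri : List Char × Nat) (p : List Char × List Char) :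
    hucZipStep ri p = hucJoinStep ri (combineE p) := rfl

lemma hucJoinStep_yes (x : List Char) (j : Nat) (v : List Char)
    (h : (j % 3 == 0 && j != 0) = true) : hucJoinStep (x, j) v = (x ++ ['-'] ++ v, j + 1) := by
  simp [hucJoinStep, h, List.append_assoc]

lemma hucJoinStep_no (x : List Char) (j : Nat) (v : List Char)
    (h : (j % 3 == 0 && j != 0) = false) : hucJoinStep (x, j) v = (x ++ v, j + 1) := by
  simp [hucJoinStep, h]

lemma zfold_pos (cs : List (List Char)) : ∀ (i : Nat) (r : List Char), i % 3 = 0 → i ≠ 0 →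
    (cs.foldl hucJoinStep (r, i)).1 =
      r ++ (hucChunks3 cs).flatMap (fun g => '-' :: g) := by
  induction cs using hucChunks3.induct with
  | case1 => intro i r _ _; simp [hucChunks3]
  | case2 p t ih =>
    intro i r h0 hne
    have hcT : (i % 3 == 0 && i != 0) = true := by simp [h0, hne]
    have hcF1 : ((i + 1) % 3 == 0 && (i + 1) != 0) = false := by
      have : (i + 1) % 3 = 1 := by omega
      simp [this]
    have hcF2 : ((i + 1 + 1) % 3 == 0 && (i + 1 + 1) != 0) = false := by
      have : (i + 1 + 1) % 3 = 2 := by omega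
      simp [this]
    rcases t with _ | ⟨q, t2⟩
    · rw [List.foldl_cons, hucJoinStep_yes _ _ _ hcT, List.foldl_nil]
      simp [hucChunks3, List.append_assoc]
    · rcases t2 with _ | ⟨s, t'⟩
      · rw [List.foldl_cons, hucJoinStep_yes _ _ _ hcT, List.foldl_cons,
          hucJoinStep_no _ _ _ hcF1, List.foldl_nil]
        simp [hucChunks3, List.append_assoc]
      · have ih' : ∀ (i : Nat) (r : List Char), i % 3 = 0 → i ≠ 0 →
            (t'.foldl hucJoinStep (r, i)).1 =
              r ++ (hucChunks3 t').flatMap (fun g => '-' :: g) := by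
          simpa using ih
        rw [List.foldl_cons, hucJoinStep_yes _ _ _ hcT, List.foldl_cons,
          hucJoinStep_no _ _ _ hcF1, List.foldl_cons, hucJoinStep_no _ _ _ hcF2]
        rw [ih' (i + 1 + 1 + 1) _ (by omega) (by omega)]
        simp [hucChunks3, List.append_assoc]

lemma zfold_zero (cs : List (List Char)) (r : List Char) :
    (cs.foldl hucJoinStep (r, 0)).1 = r ++ specJ (hucChunks3 cs) := by
  have hcF0 : ((0 : Nat) % 3 == 0 && (0 : Nat) != 0) = false := by decide
  have hcF1 : ((0 + 1 : Nat) % 3 == 0 && (0 + 1 : Nat) != 0) = false := by decide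
  have hcF2 : ((0 + 1 + 1 : Nat) % 3 == 0 && (0 + 1 + 1 : Nat) != 0) = false := by decide
  rcases cs with _ | ⟨p, _ | ⟨q, _ | ⟨s, t'⟩⟩⟩
  · simp [hucChunks3, specJ]
  · rw [List.foldl_cons, hucJoinStep_no _ _ _ hcF0, List.foldl_nil]
    simp [hucChunks3, specJ]
  · rw [List.foldl_cons, hucJoinStep_no _ _ _ hcF0, List.foldl_cons,
      hucJoinStep_no _ _ _ hcF1, List.foldl_nil]
    simp [hucChunks3, specJ, List.append_assoc]
  · rw [List.foldl_cons, hucJoinStep_no _ _ _ hcF0, List.foldl_cons,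
      hucJoinStep_no _ _ _ hcF1, List.foldl_cons, hucJoinStep_no _ _ _ hcF2]
    rw [zfold_pos t' (0 + 1 + 1 + 1) _ (by omega) (by omega)]
    rw [show hucChunks3 (p :: q :: s :: t')
        = (p ++ ((q :: s :: t').take 2).flatten) :: hucChunks3 ((q :: s :: t').drop 2) from by
      rw [hucChunks3]]
    rw [specJ]
    simp [List.append_assoc]

-- ---- replace / isIn characterizations ----
lemma hucRep_cons_of_ne (c : Char) (t : List Char) (hc : c ≠ '-') :
    hucRep (c :: t) = c :: hucRep t := by
  cases t <;> simp [hucRep, hc]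

lemma hucRep_dash_cons (x : Char) (t : List Char) (hx : x ≠ '-') :
    hucRep ('-' :: x :: t) = '-' :: hucRep (x :: t) := by
  simp [hucRep, hx]

lemma replace_go_eq (fuel : Nat) : ∀ (l acc : List Char), l.length ≤ fuel →
    PySem.Chars.replace.go ['-', '-'] ['-', '0', '-'] fuel l acc = acc.reverse ++ hucRep l := by
  induction fuel with
  | zero =>
    intro l acc h
    have : l = [] := by cases l <;> simp_all
    subst this
    simp [PySem.Chars.replace.go, hucRep]
  | succ f ih =>
    intro l acc h
    rcases l with _ | ⟨c, t⟩
    · simp [PySem.Chars.replace.go, hucRep]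
    · rcases t with _ | ⟨d, t2⟩
      · have hpre : (['-', '-'] : List Char).isPrefixOf [c] = false := by
          simp [List.isPrefixOf]
        simp only [PySem.Chars.replace.go, hpre, Bool.false_eq_true, ite_false]
        rw [ih [] (c :: acc) (by simp)]
        simp [hucRep]
      · by_cases hcd : c = '-' ∧ d = '-'
        · obtain ⟨rfl, rfl⟩ := hcd
          have hpre : (['-', '-'] : List Char).isPrefixOf ('-' :: '-' :: t2) = true := by
            simp [List.isPrefixOf]
          simp only [PySem.Chars.replace.go, hpre, ite_true]
          rw [show List.drop (['-', '-'] : List Char).length ('-' :: '-' :: t2) = t2 from rfl]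
          rw [ih t2 _ (by simp at h ⊢; omega)]
          simp [hucRep]
        · have hpre : (['-', '-'] : List Char).isPrefixOf (c :: d :: t2) = false := by
            simp [List.isPrefixOf]; rintro rfl rfl; exact hcd ⟨rfl, rfl⟩
          simp only [PySem.Chars.replace.go, hpre, Bool.false_eq_true, ite_false]
          rw [ih (d :: t2) (c :: acc) (by simp at h ⊢; omega)]
          simp [hucRep, hcd]

lemma replace_eq_hucRep (s : List Char) :
    PySem.Chars.replace s ['-', '-'] ['-', '0', '-'] = hucRep s := by
  rw [PySem.Chars.replace]
  simp only [List.isEmpty_cons, Bool.false_eq_true, ite_false]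
  rw [replace_go_eq s.length s [] le_rfl]
  simp

lemma has2_iff (s : List Char) : (['-', '-'] : List Char) <:+: s ↔ hucHas2 s = true := by
  induction s using hucHas2.induct with
  | case1 =>
    constructor
    · intro h; have := h.length_le; simp at this
    · intro h; simp [hucHas2] at h
  | case2 c =>
    constructor
    · intro h; have := h.length_le; simp at this
    · intro h; simp [hucHas2] at h
  | case3 c d t hcd =>
    obtain ⟨rfl, rfl⟩ := hcd
    constructor
    · intro _; simp [hucHas2]
    · intro _; exact ⟨[], t, by simp⟩
  | case4 c d t hcd ih =>
    rw [List.infix_cons_iff]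
    rw [show hucHas2 (c :: d :: t) = hucHas2 (d :: t) from by simp [hucHas2, hcd]]
    rw [← ih]
    constructor
    · rintro (hp | hi)
      · rw [List.cons_prefix_cons] at hp
        obtain ⟨rfl, hp⟩ := hp
        rw [List.cons_prefix_cons] at hp
        exact absurd ⟨rfl, hp.1.symm⟩ hcd
      · exact hi
    · intro h; exact Or.inr h

lemma isIn_eq_hucHas2 (s : List Char) : PySem.Chars.isIn ['-', '-'] s = hucHas2 s := by
  cases h : hucHas2 s
  · refine (PySem.Chars.isIn_eq_false_iff _ _).mpr ?_
    intro hin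
    exact absurd ((has2_iff s).mp hin) (by simp [h])
  · exact (PySem.Chars.isIn_iff_infix _ _).mpr ((has2_iff s).mpr h)

-- ---- one replace pass on a joined list ----
lemma hucRep_append_nodash (a : List Char) : ∀ (s : List Char), (∀ c ∈ a, c ≠ '-') →
    hucRep (a ++ s) = a ++ hucRep s := by
  induction a with
  | nil => intro s _; rfl
  | cons c a' ih =>
    intro s h
    rw [List.cons_append, hucRep_cons_of_ne c _ (h c (by simp)),
      ih s (fun x hx => h x (by simp [hx]))]
    rfl

lemma hucHas2_cons_of_ne (c : Char) (t : List Char) (hc : c ≠ '-') :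
    hucHas2 (c :: t) = hucHas2 t := by
  cases t <;> simp [hucHas2, hc]

lemma hucHas2_dash_cons (x : Char) (t : List Char) (hx : x ≠ '-') :
    hucHas2 ('-' :: x :: t) = hucHas2 (x :: t) := by
  simp [hucHas2, hx]

lemma hucHas2_append_nodash (a : List Char) : ∀ (s : List Char), (∀ c ∈ a, c ≠ '-') →
    hucHas2 (a ++ s) = hucHas2 s := by
  induction a with
  | nil => intro s _; rfl
  | cons c a' ih =>
    intro s h
    rw [List.cons_append, hucHas2_cons_of_ne c _ (h c (by simp)),
      ih s (fun x hx => h x (by simp [hx]))]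

lemma hucRep_nodash (a : List Char) (h : ∀ c ∈ a, c ≠ '-') : hucRep a = a := by
  have := hucRep_append_nodash a [] h
  simpa [hucRep] using this

lemma hucHas2_nodash (a : List Char) (h : ∀ c ∈ a, c ≠ '-') : hucHas2 a = false := by
  have := hucHas2_append_nodash a [] h
  simpa [hucHas2] using this

lemma pass_length (gs : List (List Char)) : (hucPass gs).length = gs.length := by
  induction gs using hucPass.induct with
  | case1 => rfl
  | case2 => rfl
  | case3 => rfl
  | case4 a c rest ih => simp [hucPass, ih]
  | case5 a b c rest hb ih => simp [hucPass, hb, ih]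

lemma pass_ne_nil (gs : List (List Char)) (h : gs ≠ []) : hucPass gs ≠ [] := by
  intro hc
  have := pass_length gs
  rw [hc] at this
  exact h (List.eq_nil_of_length_eq_zero this.symm)

lemma dashFree_cons {g : List Char} {gs : List (List Char)} :
    dashFree (g :: gs) ↔ (∀ c ∈ g, c ≠ '-') ∧ dashFree gs := by
  constructor
  · intro h; exact ⟨h g (by simp), fun x hx c hc => h x (by simp [hx]) c hc⟩
  · rintro ⟨h1, h2⟩ x hx c hc
    rcases List.mem_cons.mp hx with rfl | hx'
    · exact h1 c hc
    · exact h2 x hx' c hc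

lemma hucRep_join (gs : List (List Char)) (h : dashFree gs) :
    hucRep (specJ gs) = specJ (hucPass gs) := by
  induction gs using hucPass.induct with
  | case1 => rfl
  | case2 a =>
    simp only [specJ, List.flatMap_nil, List.append_nil, hucPass]
    exact hucRep_nodash a (h a (by simp))
  | case3 a b =>
    rw [dashFree_cons] at h
    obtain ⟨ha, h'⟩ := h
    have hb : ∀ c ∈ b, c ≠ '-' := (dashFree_cons.mp h').1
    rw [specJ_cons a [b] (by simp), hucRep_append_nodash a _ ha]
    rw [show specJ [b] = b from by simp [specJ]]
    rcases b with _ | ⟨x, b'⟩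
    · simp [hucRep, hucPass, specJ]
    · rw [hucRep_dash_cons x b' (hb x (by simp)), hucRep_nodash (x :: b') hb]
      rw [show hucPass [a, x :: b'] = [a, x :: b'] from by simp [hucPass]]
      rw [specJ_cons a [x :: b'] (by simp)]
      rw [show specJ [x :: b'] = x :: b' from by simp [specJ]]
  | case4 a c rest ih =>
    rw [dashFree_cons] at h
    obtain ⟨ha, h'⟩ := h
    rw [dashFree_cons] at h'
    obtain ⟨-, h''⟩ := h'
    rw [specJ_cons a _ (by simp), specJ_cons [] _ (by simp), hucRep_append_nodash a _ ha]
    simp only [List.nil_append]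
    rw [show hucRep ('-' :: '-' :: specJ (c :: rest))
        = '-' :: '0' :: '-' :: hucRep (specJ (c :: rest)) from by simp [hucRep]]
    rw [ih h'']
    rw [show hucPass (a :: [] :: c :: rest) = a :: ['0'] :: hucPass (c :: rest) from by
      simp [hucPass]]
    rw [specJ_cons a _ (by simp), specJ_cons ['0'] _ (pass_ne_nil _ (by simp))]
    rfl
  | case5 a b c rest hb ih =>
    rw [dashFree_cons] at h
    obtain ⟨ha, h'⟩ := h
    have hb' : ∀ x ∈ b, x ≠ '-' := (dashFree_cons.mp h').1
    rw [specJ_cons a _ (by simp), hucRep_append_nodash a _ ha]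
    rcases b with _ | ⟨x, b'⟩
    · exact absurd rfl hb
    · rw [specJ_cons (x :: b') _ (by simp)]
      rw [show ('-' :: (x :: b' ++ '-' :: specJ (c :: rest)))
          = '-' :: x :: (b' ++ '-' :: specJ (c :: rest)) from rfl]
      rw [hucRep_dash_cons x _ (hb' x (by simp))]
      rw [show (x :: (b' ++ '-' :: specJ (c :: rest))) = specJ ((x :: b') :: c :: rest) from by
        rw [specJ_cons (x :: b') _ (by simp)]; rfl]
      rw [ih h']
      rw [show hucPass (a :: (x :: b') :: c :: rest) = a :: hucPass ((x :: b') :: c :: rest) from by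
        simp [hucPass]]
      rw [specJ_cons a _ (pass_ne_nil _ (by simp))]

lemma hucHas2_join (gs : List (List Char)) (h : dashFree gs) :
    hucHas2 (specJ gs) = hucHasIE gs := by
  induction gs using hucPass.induct with
  | case1 => rfl
  | case2 a =>
    simp only [specJ, List.flatMap_nil, List.append_nil, hucHasIE]
    exact hucHas2_nodash a (h a (by simp))
  | case3 a b =>
    rw [dashFree_cons] at h
    obtain ⟨ha, h'⟩ := h
    have hb : ∀ c ∈ b, c ≠ '-' := (dashFree_cons.mp h').1
    rw [specJ_cons a [b] (by simp), hucHas2_append_nodash a _ ha]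
    rw [show specJ [b] = b from by simp [specJ]]
    rcases b with _ | ⟨x, b'⟩
    · simp [hucHas2, hucHasIE]
    · rw [hucHas2_dash_cons x b' (hb x (by simp)), hucHas2_nodash (x :: b') hb]
      rfl
  | case4 a c rest ih =>
    rw [dashFree_cons] at h
    obtain ⟨ha, -⟩ := h
    rw [specJ_cons a _ (by simp), specJ_cons [] _ (by simp), hucHas2_append_nodash a _ ha]
    simp [hucHas2, hucHasIE]
  | case5 a b c rest hb ih =>
    rw [dashFree_cons] at h
    obtain ⟨ha, h'⟩ := h
    have hb' : ∀ x ∈ b, x ≠ '-' := (dashFree_cons.mp h').1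
    rw [specJ_cons a _ (by simp), hucHas2_append_nodash a _ ha]
    rcases b with _ | ⟨x, b'⟩
    · exact absurd rfl hb
    · rw [specJ_cons (x :: b') _ (by simp)]
      rw [show ('-' :: (x :: b' ++ '-' :: specJ (c :: rest)))
          = '-' :: x :: (b' ++ '-' :: specJ (c :: rest)) from rfl]
      rw [hucHas2_dash_cons x _ (hb' x (by simp))]
      rw [show (x :: (b' ++ '-' :: specJ (c :: rest))) = specJ ((x :: b') :: c :: rest) from by
        rw [specJ_cons (x :: b') _ (by simp)]; rfl]
      rw [ih h']
      rw [show hucHasIE (a :: (x :: b') :: c :: rest) = hucHasIE ((x :: b') :: c :: rest) from by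
        simp [hucHasIE]]

-- ---- pass bookkeeping ----
lemma pass_dashFree (gs : List (List Char)) (h : dashFree gs) : dashFree (hucPass gs) := by
  induction gs using hucPass.induct with
  | case1 => exact h
  | case2 a => exact h
  | case3 a b => exact h
  | case4 a c rest ih =>
    rw [dashFree_cons] at h
    obtain ⟨ha, h'⟩ := h
    rw [dashFree_cons] at h'
    obtain ⟨-, h''⟩ := h'
    rw [show hucPass (a :: [] :: c :: rest) = a :: ['0'] :: hucPass (c :: rest) from by
      simp [hucPass]]
    rw [dashFree_cons]
    refine ⟨ha, ?_⟩
    rw [dashFree_cons]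
    refine ⟨?_, ih h''⟩
    intro c hc
    rw [List.mem_singleton] at hc
    subst hc
    decide
  | case5 a b c rest hb ih =>
    rw [dashFree_cons] at h
    obtain ⟨ha, h'⟩ := h
    rw [show hucPass (a :: b :: c :: rest) = a :: hucPass (b :: c :: rest) from by
      simp [hucPass, hb]]
    rw [dashFree_cons]
    exact ⟨ha, ih h'⟩

lemma countEmpty_cons (g : List Char) (gs : List (List Char)) :
    countEmpty (g :: gs) = (if g = [] then 1 else 0) + countEmpty gs := by
  rcases g with _ | ⟨x, g'⟩ <;> simp [countEmpty, List.countP_cons] <;> omega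

lemma countEmpty_nil_cons (gs : List (List Char)) : countEmpty ([] :: gs) = countEmpty gs + 1 := by
  simp [countEmpty, List.countP_cons]

lemma countEmpty_zero_cons (gs : List (List Char)) : countEmpty (['0'] :: gs) = countEmpty gs := by
  simp [countEmpty, List.countP_cons]

lemma pass_countEmpty_le (gs : List (List Char)) : countEmpty (hucPass gs) ≤ countEmpty gs := by
  induction gs using hucPass.induct with
  | case1 => exact le_rfl
  | case2 a => exact le_rfl
  | case3 a b => exact le_rfl
  | case4 a c rest ih =>
    rw [show hucPass (a :: [] :: c :: rest) = a :: ['0'] :: hucPass (c :: rest) from by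
      simp [hucPass]]
    rw [countEmpty_cons a, countEmpty_zero_cons, countEmpty_cons a, countEmpty_nil_cons]
    omega
  | case5 a b c rest hb ih =>
    rw [show hucPass (a :: b :: c :: rest) = a :: hucPass (b :: c :: rest) from by
      simp [hucPass, hb]]
    simp only [countEmpty_cons] at ih ⊢
    omega

lemma hasIE_tail (a b : List Char) (c : List Char) (rest : List (List Char)) (hb : ¬b = []) :
    hucHasIE (a :: b :: c :: rest) = hucHasIE (b :: c :: rest) := by
  simp [hucHasIE, hb]

lemma pass_countEmpty_lt (gs : List (List Char)) (h : hucHasIE gs = true) :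
    countEmpty (hucPass gs) < countEmpty gs := by
  induction gs using hucPass.induct with
  | case1 => simp [hucHasIE] at h
  | case2 a => simp [hucHasIE] at h
  | case3 a b => simp [hucHasIE] at h
  | case4 a c rest ih =>
    rw [show hucPass (a :: [] :: c :: rest) = a :: ['0'] :: hucPass (c :: rest) from by
      simp [hucPass]]
    have hle := pass_countEmpty_le (c :: rest)
    rw [countEmpty_cons a, countEmpty_zero_cons, countEmpty_cons a, countEmpty_nil_cons]
    omega
  | case5 a b c rest hb ih =>
    rw [show hucPass (a :: b :: c :: rest) = a :: hucPass (b :: c :: rest) from by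
      simp [hucPass, hb]]
    rw [hasIE_tail a b c rest hb] at h
    have := ih h
    simp only [countEmpty_cons] at this ⊢
    omega

lemma map_fixG_pass (gs : List (List Char)) : (hucPass gs).map fixG = gs.map fixG := by
  induction gs using hucPass.induct with
  | case1 => rfl
  | case2 a => rfl
  | case3 a b => rfl
  | case4 a c rest ih =>
    rw [show hucPass (a :: [] :: c :: rest) = a :: ['0'] :: hucPass (c :: rest) from by
      simp [hucPass]]
    simp only [List.map_cons, ih]
    rfl
  | case5 a b c rest hb ih =>
    rw [show hucPass (a :: b :: c :: rest) = a :: hucPass (b :: c :: rest) from by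
      simp [hucPass, hb]]
    simp only [List.map_cons, ih]

lemma hasIE_countEmpty (gs : List (List Char)) (h : hucHasIE gs = true) : 1 ≤ countEmpty gs := by
  induction gs using hucPass.induct with
  | case1 => simp [hucHasIE] at h
  | case2 a => simp [hucHasIE] at h
  | case3 a b => simp [hucHasIE] at h
  | case4 a c rest ih =>
    rw [countEmpty_cons a, countEmpty_nil_cons]
    omega
  | case5 a b c rest hb ih =>
    rw [hasIE_tail a b c rest hb] at h
    have := ih h
    simp only [countEmpty_cons] at this ⊢
    omega

-- ---- patches ----
lemma endswith_dash (s : List Char) :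
    PySem.Chars.endswith s ['-'] = (s.getLast? == some '-') := by
  rw [show PySem.Chars.endswith s ['-'] = (['-'] : List Char).isSuffixOf s from rfl]
  rw [List.isSuffixOf]
  rcases hs : s.reverse with _ | ⟨c, r⟩
  · have : s = [] := by simpa using congrArg List.reverse hs
    subst this
    simp
  · have hlast : s.getLast? = some c := by
      rw [← List.head?_reverse, hs]; rfl
    rw [hlast]
    by_cases hc : c = '-'
    · subst hc; simp [List.isPrefixOf]
    · simp [List.isPrefixOf, hc, Ne.symm hc]

lemma startswith_dash_iff (s : List Char) :
    PySem.Chars.startswith s ['-'] = (s.head? == some '-') := by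
  rw [show PySem.Chars.startswith s ['-'] = (['-'] : List Char).isPrefixOf s from rfl]
  rcases s with _ | ⟨c, t⟩
  · simp
  · by_cases hc : c = '-'
    · subst hc; simp [List.isPrefixOf]
    · simp [List.isPrefixOf, hc, Ne.symm hc]

lemma specJ_concat (ys : List (List Char)) (z : List Char) (h : ys ≠ []) :
    specJ (ys ++ [z]) = specJ ys ++ '-' :: z := by
  induction ys with
  | nil => exact absurd rfl h
  | cons a ys' ih =>
    rcases ys' with _ | ⟨b, ys''⟩
    · simp [specJ]
    · rw [List.cons_append, specJ_cons a _ (by simp), specJ_cons a _ (by simp), ih (by simp)]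
      simp [List.append_assoc]

lemma mapfix_of_ne (mid : List (List Char)) (h : ∀ m ∈ mid, m ≠ []) : mid.map fixG = mid := by
  calc mid.map fixG = mid.map id := List.map_congr_left (fun m hm => by simp [fixG, h m hm])
  _ = mid := List.map_id _

lemma hasIE_false_mid (a : List Char) : ∀ (mid : List (List Char)) (z : List Char),
    hucHasIE (a :: (mid ++ [z])) = false → ∀ m ∈ mid, m ≠ [] := by
  intro mid
  induction mid generalizing a with
  | nil => intro z _ m hm; simp at hm
  | cons m0 mid' ih =>
    intro z h m hm
    simp only [List.cons_append] at h
    obtain ⟨u, us, huu⟩ : ∃ u us, mid' ++ [z] = u :: us := by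
      rcases mid' with _ | ⟨x, xs⟩ <;> exact ⟨_, _, rfl⟩
    have hexp : hucHasIE (a :: m0 :: (mid' ++ [z])) =
        if m0 = [] then true else hucHasIE (m0 :: (mid' ++ [z])) := by
      rw [huu]; simp [hucHasIE]
    rw [hexp] at h
    by_cases hm0 : m0 = []
    · rw [if_pos hm0] at h; exact absurd h (by simp)
    · rw [if_neg hm0] at h
      rcases List.mem_cons.mp hm with rfl | hm'
      · exact hm0
      · exact ih m0 z h m hm'

lemma getLast_ne_dash (z : List Char) (hz : z ≠ []) (hdf : ∀ c ∈ z, c ≠ '-') :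
    z.getLast? ≠ some '-' := by
  rw [List.getLast?_eq_some_getLast hz]
  intro hc
  exact hdf _ (List.getLast_mem hz) (by injection hc)

lemma lemPatch (gs : List (List Char)) (h2 : 2 ≤ gs.length) (hdf : dashFree gs)
    (hie : hucHasIE gs = false) :
    hucPatches (specJ gs) = specJ (gs.map fixG) := by
  rcases gs with _ | ⟨a, t⟩
  · simp at h2
  have ht : t ≠ [] := by
    intro hc; rw [hc] at h2; simp at h2
  obtain ⟨mid, z, rfl⟩ : ∃ mid z, t = mid ++ [z] := by
    rcases List.eq_nil_or_concat t with hc | ⟨l', b, hc⟩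
    · exact absurd hc ht
    · exact ⟨l', b, by simpa [List.concat_eq_append] using hc⟩
  have hmid : ∀ m ∈ mid, m ≠ [] := hasIE_false_mid a mid z hie
  have hmidfix : mid.map fixG = mid := mapfix_of_ne mid hmid
  have hdfa : ∀ c ∈ a, c ≠ '-' := hdf a (by simp)
  have hdfz : ∀ c ∈ z, c ≠ '-' := hdf z (by simp [List.mem_append])
  rw [hucPatches]
  have hstart : (if PySem.Chars.startswith (specJ (a :: (mid ++ [z]))) ['-']
        then '0' :: specJ (a :: (mid ++ [z])) else specJ (a :: (mid ++ [z])))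
      = specJ (fixG a :: (mid ++ [z])) := by
    rcases a with _ | ⟨c, a'⟩
    · rw [show specJ ([] :: (mid ++ [z])) = '-' :: specJ (mid ++ [z]) from by
        rw [specJ_cons _ _ (by simp)]; rfl]
      rw [startswith_dash_iff]
      rw [show fixG [] = ['0'] from rfl, specJ_cons ['0'] _ (by simp)]
      simp
    · rw [specJ_cons (c :: a') _ (by simp), startswith_dash_iff]
      rw [show fixG (c :: a') = c :: a' from by simp [fixG]]
      rw [show ((c :: a' ++ '-' :: specJ (mid ++ [z])).head? == some '-') = false from by
        simp [hdfa c (by simp)]]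
      rw [if_neg (by simp)]
      rw [specJ_cons (c :: a') _ (by simp)]
  rw [hstart]
  have ha'ne : fixG a ≠ [] := by
    unfold fixG; split_ifs with hh
    · simp
    · exact hh
  set a' := fixG a with ha'
  have hcons : a' :: (mid ++ [z]) = (a' :: mid) ++ [z] := rfl
  rcases z with _ | ⟨w, z'⟩
  · -- trailing group empty
    have hJend : specJ (a' :: (mid ++ [[]])) = specJ (a' :: mid) ++ ['-'] := by
      rw [hcons, specJ_concat _ _ (by simp)]
    have hend : PySem.Chars.endswith (specJ (a' :: (mid ++ [[]]))) ['-'] = true := by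
      rw [hJend, endswith_dash, List.getLast?_concat]
      rfl
    rw [hend, if_pos rfl, hJend]
    rw [show (a :: (mid ++ [[]])).map fixG = a' :: (mid.map fixG ++ [fixG []]) from by
      simp [ha']]
    rw [hmidfix, show fixG [] = ['0'] from rfl]
    rw [show a' :: (mid ++ [['0']]) = (a' :: mid) ++ [['0']] from rfl,
      specJ_concat _ _ (by simp)]
    simp
  · -- trailing group nonempty
    have hJend : specJ (a' :: (mid ++ [w :: z'])) = specJ (a' :: mid) ++ '-' :: (w :: z') := by
      rw [hcons, specJ_concat _ _ (by simp)]
    have hend : PySem.Chars.endswith (specJ (a' :: (mid ++ [w :: z']))) ['-'] = false := by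
      rw [hJend, endswith_dash]
      have h1 : (specJ (a' :: mid) ++ '-' :: (w :: z')).getLast? = (w :: z').getLast? := by
        rw [show specJ (a' :: mid) ++ '-' :: (w :: z')
            = (specJ (a' :: mid) ++ ['-']) ++ (w :: z') from by simp]
        exact List.getLast?_append_of_ne_nil _ (by simp)
      rw [h1]
      have := getLast_ne_dash (w :: z') (by simp) hdfz
      simpa using this
    rw [hend]
    rw [if_neg (by simp)]
    rw [show (a :: (mid ++ [w :: z'])).map fixG = a' :: (mid.map fixG ++ [fixG (w :: z')]) from by
      simp [ha']]
    rw [hmidfix, show fixG (w :: z') = w :: z' from by simp [fixG]]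

lemma lemClean (n : Nat) : ∀ (gs : List (List Char)), 2 ≤ gs.length → dashFree gs →
    countEmpty gs ≤ n →
    hucPatches (hucCleanLoop n (specJ gs)) = specJ (gs.map fixG) := by
  induction n with
  | zero =>
    intro gs h2 hdf hcnt
    have hie : hucHasIE gs = false := by
      cases hc : hucHasIE gs
      · rfl
      · have := hasIE_countEmpty gs hc; omega
    rw [show hucCleanLoop 0 (specJ gs) = specJ gs from rfl]
    exact lemPatch gs h2 hdf hie
  | succ n ih =>
    intro gs h2 hdf hcnt
    cases hie : hucHasIE gs
    · have hii : PySem.Chars.isIn ['-', '-'] (specJ gs) = false := by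
        rw [isIn_eq_hucHas2, hucHas2_join gs hdf, hie]
      rw [show hucCleanLoop (n + 1) (specJ gs)
          = if PySem.Chars.isIn ['-', '-'] (specJ gs) then
              hucCleanLoop n (PySem.Chars.replace (specJ gs) ['-', '-'] ['-', '0', '-'])
            else specJ gs from rfl]
      rw [hii]
      rw [if_neg (by simp)]
      exact lemPatch gs h2 hdf hie
    · have hii : PySem.Chars.isIn ['-', '-'] (specJ gs) = true := by
        rw [isIn_eq_hucHas2, hucHas2_join gs hdf, hie]
      rw [show hucCleanLoop (n + 1) (specJ gs)
          = if PySem.Chars.isIn ['-', '-'] (specJ gs) then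
              hucCleanLoop n (PySem.Chars.replace (specJ gs) ['-', '-'] ['-', '0', '-'])
            else specJ gs from rfl]
      rw [hii, if_pos rfl]
      rw [replace_eq_hucRep, hucRep_join gs hdf]
      have hlt := pass_countEmpty_lt gs hie
      have hres := ih (hucPass gs) (by rw [pass_length]; exact h2) (pass_dashFree gs hdf)
        (by omega)
      rw [hres, map_fixG_pass]

-- ---- sizes / dash-freeness of the actual data ----
lemma splitOn_go_len (sep : List Char) (fuel : Nat) : ∀ (l cur : List Char) (acc : List (List Char)),
    acc.length < (PySem.Chars.splitOn.go sep fuel l cur acc).length := by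
  induction fuel with
  | zero => intro l cur acc; simp [PySem.Chars.splitOn.go]
  | succ f ih =>
    intro l cur acc
    rcases l with _ | ⟨c, rest⟩
    · simp [PySem.Chars.splitOn.go]
    · rw [PySem.Chars.splitOn.go]
      split
      · have := ih (List.drop sep.length (c :: rest)) [] (cur.reverse :: acc)
        simp at this ⊢
        omega
      · exact ih rest (c :: cur) acc

lemma splitOn_ne_nil (s sep : List Char) : PySem.Chars.splitOn s sep ≠ [] := by
  have := splitOn_go_len sep (s.length + 1) s [] []
  intro hc
  rw [PySem.Chars.splitOn] at hc
  rw [hc] at this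
  simp at this

lemma pyGetD_ref_ne (l : List Char) (hl : ∀ c ∈ l, c ≠ '-') (i : Int) :
    PySem.List.pyGetD l i ' ' ≠ '-' := by
  rw [PySem.List.pyGetD]
  rcases h : PySem.List.pyGet? l i with _ | c
  · simp
  · simp only [Option.getD_some]
    apply hl
    rw [PySem.List.pyGet?] at h
    rcases hk : PySem.List.pyIdx? l.length i with _ | k <;> rw [hk] at h
    · simp at h
    · simp at h
      exact List.mem_of_getElem? h

lemma altR1_nodash : ∀ c ∈ hucAltR1, c ≠ '-' := by
  intro c hc
  rw [hucAltR1] at hc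
  simp only [List.mem_cons, List.not_mem_nil, or_false] at hc
  rcases hc with rfl | rfl | rfl | rfl <;> decide

lemma altR2_nodash : ∀ c ∈ hucAltR2, c ≠ '-' := by
  intro c hc
  rw [hucAltR2] at hc
  simp only [List.mem_cons, List.not_mem_nil, or_false] at hc
  rcases hc with rfl | rfl | rfl | rfl <;> decide

lemma altPair_dashFree (cell : List Char) (m j : Int) : ∀ c ∈ hucAltPair cell m j, c ≠ '-' := by
  intro c hc
  rw [hucAltPair] at hc
  rcases List.mem_append.mp hc with h | h
  · revert h
    split
    · intro h; simp at h; subst h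
      exact pyGetD_ref_ne hucAltR1 altR1_nodash _
    · intro h; simp at h
  · revert h
    split
    · intro h; simp at h; subst h
      exact pyGetD_ref_ne hucAltR2 altR2_nodash _
    · intro h; simp at h

lemma pairsSpec_dashFree (data : List (List Char)) : ∀ k, dashFree (pairsSpec data k) := by
  induction data with
  | nil => intro k g hg; simp [pairsSpec] at hg
  | cons c t ih =>
    intro k g hg c' hc'
    rw [pairsSpec] at hg
    rcases List.mem_append.mp hg with h | h
    · simp only [cellPairs, List.mem_cons, List.not_mem_nil, or_false] at h
      rcases h with h | h | h | h <;> (subst h; exact altPair_dashFree _ _ _ c' hc')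
    · exact ih (k + 1) g h c' hc'

lemma pairsSpec_length (data : List (List Char)) : ∀ k, (pairsSpec data k).length = 4 * data.length := by
  induction data with
  | nil => intro k; simp [pairsSpec]
  | cons c t ih =>
    intro k
    rw [pairsSpec]
    simp [cellPairs, ih (k + 1)]
    omega

lemma chunks3_dashFree (ps : List (List Char)) (h : dashFree ps) : dashFree (hucChunks3 ps) := by
  induction ps using hucChunks3.induct with
  | case1 => intro g hg; simp [hucChunks3] at hg
  | case2 p t ih =>
    intro g hg c hc
    rw [show hucChunks3 (p :: t) = (p ++ (t.take 2).flatten) :: hucChunks3 (t.drop 2) from by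
      rw [hucChunks3]] at hg
    rw [dashFree_cons] at h
    obtain ⟨hp, ht⟩ := h
    rcases List.mem_cons.mp hg with rfl | hg'
    · rcases List.mem_append.mp hc with h | h
      · exact hp c h
      · obtain ⟨l, hl, hcl⟩ := List.mem_flatten.mp h
        exact ht l (List.mem_of_mem_take hl) c hcl
    · exact ih (fun x hx => ht x (List.mem_of_mem_drop hx)) g hg' c hc

lemma chunks3_ne_nil (ps : List (List Char)) (h : ps ≠ []) : hucChunks3 ps ≠ [] := by
  rcases ps with _ | ⟨p, t⟩
  · exact absurd rfl h
  · rw [show hucChunks3 (p :: t) = (p ++ (t.take 2).flatten) :: hucChunks3 (t.drop 2) from by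
      rw [hucChunks3]]
    simp

lemma chunks3_len2 (ps : List (List Char)) (h : 4 ≤ ps.length) : 2 ≤ (hucChunks3 ps).length := by
  rcases ps with _ | ⟨p, t⟩
  · simp at h
  · rw [show hucChunks3 (p :: t) = (p ++ (t.take 2).flatten) :: hucChunks3 (t.drop 2) from by
      rw [hucChunks3]]
    have ht : t.drop 2 ≠ [] := by
      intro hc
      have := congrArg List.length hc
      simp at this h
      omega
    have := List.length_pos_of_ne_nil (chunks3_ne_nil _ ht)
    simp
    omega

lemma len_le_specJ (gs : List (List Char)) : gs.length ≤ (specJ gs).length + 1 := by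
  induction gs with
  | nil => simp
  | cons a t ih =>
    rcases t with _ | ⟨b, t'⟩
    · simp
    · rw [specJ_cons a _ (by simp)]
      simp at ih ⊢
      omega

lemma countEmpty_le_lenJ (gs : List (List Char)) : countEmpty gs ≤ (specJ gs).length + 1 :=
  le_trans (List.countP_le_length) (len_le_specJ gs)

-- ===== VERDICT (by name: the statement is the Claim_ definition above) =====
theorem convertHUC6_spec : Claim_equal_convertHUC6 := by
  intro dots debug _
  rw [Spec_convertHUC6]
  simp only [convertHUC6, convertHUC6_alt]
  rw [show ((0 : Int), ([] : List (List Char)), ([] : List (List Char)))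
      = (PySem.Int.mod 0 3, ([] : List (List Char)), ([] : List (List Char))) from by decide]
  set data := PySem.Chars.splitOn dots.toList ['-'] with hdata
  obtain ⟨hlen, hmap⟩ := foldA_eq data 0 [] [] rfl
  set st := data.foldl hucCellStep (PySem.Int.mod 0 3, [], []) with hst
  have hres : ((st.2.1.zip st.2.2).foldl hucZipStep ([], 0)).1
      = specJ (hucChunks3 (pairsSpec data 0)) := by
    rw [show hucZipStep = fun ri p => hucJoinStep ri (combineE p) from
      funext fun ri => funext fun p => zipStep_eq ri p]
    rw [← List.foldl_map]
    rw [show (st.2.1.zip st.2.2).map combineE = pairsSpec data 0 from by simpa using hmap]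
    simpa using zfold_zero (pairsSpec data 0) []
  rw [hres]
  have hdlen : 1 ≤ data.length := List.length_pos_of_ne_nil (splitOn_ne_nil _ _)
  have hp4 : 4 ≤ (pairsSpec data 0).length := by
    rw [pairsSpec_length data 0]; omega
  set gs := hucChunks3 (pairsSpec data 0) with hgs
  have hgs2 : 2 ≤ gs.length := chunks3_len2 _ hp4
  have hgsdf : dashFree gs := chunks3_dashFree _ (pairsSpec_dashFree data 0)
  have hclean := lemClean ((specJ gs).length + 1) gs hgs2 hgsdf
    (le_trans (countEmpty_le_lenJ gs) (by omega))
  rw [show (if PySem.Chars.endswith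
        (if PySem.Chars.startswith (hucCleanLoop ((specJ gs).length + 1) (specJ gs)) ['-'] then
          '0' :: hucCleanLoop ((specJ gs).length + 1) (specJ gs)
        else hucCleanLoop ((specJ gs).length + 1) (specJ gs)) ['-'] then
        (if PySem.Chars.startswith (hucCleanLoop ((specJ gs).length + 1) (specJ gs)) ['-'] then
          '0' :: hucCleanLoop ((specJ gs).length + 1) (specJ gs)
        else hucCleanLoop ((specJ gs).length + 1) (specJ gs)) ++ ['0']
      else
        (if PySem.Chars.startswith (hucCleanLoop ((specJ gs).length + 1) (specJ gs)) ['-'] then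
          '0' :: hucCleanLoop ((specJ gs).length + 1) (specJ gs)
        else hucCleanLoop ((specJ gs).length + 1) (specJ gs)))
      = hucPatches (hucCleanLoop ((specJ gs).length + 1) (specJ gs)) from rfl]
  rw [hclean]
  rw [show (PySem.List.enumerate data).foldl hucAltCell [] = pairsSpec data 0 from by
    simpa using altPairs_eq data 0 []]
  rw [join_eq_specJ]
  rfl
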